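-- pv_equiv track=rewrite | github.com/krhanson3/Intro_To_Python | CapstoneProject.py | shorten_space
-- ===== SOURCE A (Python) =====
-- def shorten_space(text):
--     new_string = ''
--     prev_char = ''
--     for i in text:
--         if i == ' ' and prev_char == ' ':
--             prev_char = i
--             continue
--         new_string += i
--         prev_char = i
--     return new_string
-- ===== SOURCE B (Python) =====
-- def shorten_space(text):
--     pieces = []
--     i = 0
--     n = len(text)
--     while i < n:
--         j = i
--         while j < n and text[j] == text[i]:
--             j += 1
--         pieces.append(' ' if text[i] == ' ' else text[i:j])
--         i = j
--     return ''.join(pieces)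
-- ===== Notes on version B (the rewrite author's own statement) =====
-- stated objective: alternative
-- what changed: Replaces the char-by-char previous-character state machine with a run-based scan: split the text into maximal runs of equal characters, emit one space per space run and each other run verbatim, then join the pieces.
import Mathlib
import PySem

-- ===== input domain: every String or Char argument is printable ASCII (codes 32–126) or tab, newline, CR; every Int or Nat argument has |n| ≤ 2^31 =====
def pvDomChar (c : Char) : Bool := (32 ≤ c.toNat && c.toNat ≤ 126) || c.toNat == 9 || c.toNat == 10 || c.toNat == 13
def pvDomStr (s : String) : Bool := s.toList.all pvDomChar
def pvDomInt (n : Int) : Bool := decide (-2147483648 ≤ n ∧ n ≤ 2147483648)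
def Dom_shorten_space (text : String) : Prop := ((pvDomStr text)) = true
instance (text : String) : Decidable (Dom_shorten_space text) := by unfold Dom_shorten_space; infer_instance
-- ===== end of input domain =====

-- B replaces A's char-by-char previous-character state machine with a run-based scan
-- (maximal runs of equal characters; one space per space run, other runs verbatim); same cost class.

-- ===== PORT A =====
-- A: fold over the characters with state (new_string, prev_char); prev_char starts as '' (none here).
def shorten_space (text : String) : String :=
  let st := text.toList.foldl
    (fun (st : List Char × Option Char) i =>
      if i = ' ' ∧ st.2 = some ' ' then (st.1, some i)
      else (st.1 ++ [i], some i))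
    ([], none)
  String.mk st.1

-- ===== PORT B =====
-- inner while loop of Source B: take the maximal run of characters equal to c, return (run, rest)
def pvTakeRun (c : Char) : List Char → List Char × List Char
  | [] => ([], [])
  | x :: xs =>
    if x = c then
      let p := pvTakeRun c xs
      (x :: p.1, p.2)
    else ([], x :: xs)

theorem pvTakeRun_rest_le (c : Char) : ∀ xs : List Char, (pvTakeRun c xs).2.length ≤ xs.length := by
  intro xs
  induction xs with
  | nil => simp [pvTakeRun]
  | cons x xs ih =>
    simp only [pvTakeRun]
    split
    · exact Nat.le_succ_of_le ih
    · simp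

-- outer while loop of Source B: for each run, emit a single space or the run itself, and join
def pvShortenRuns : List Char → List Char
  | [] => []
  | c :: xs =>
    let p := pvTakeRun c xs
    (if c = ' ' then [' '] else c :: p.1) ++ pvShortenRuns p.2
termination_by l => l.length
decreasing_by
  exact Nat.lt_succ_of_le (pvTakeRun_rest_le c xs)

def shorten_space_alt (text : String) : String :=
  String.mk (pvShortenRuns text.toList)

-- ===== PRECONDITION & SPEC =====
def Spec_shorten_space (text : String) (out : String) : Prop := out = shorten_space_alt text
instance (text : String) (out : String) : Decidable (Spec_shorten_space text out) := by unfold Spec_shorten_space; infer_instance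

-- ===== CLAIM (what is proved, stated in full; the proofs are below) =====
def Claim_equal_shorten_space : Prop := ∀ (text : String), Dom_shorten_space text → Spec_shorten_space text (shorten_space text)

-- ===== LEMMAS AND PROOFS =====

-- A's loop as a structural recursion on (prev_char, remaining text)
def pvGoA : Option Char → List Char → List Char
  | _, [] => []
  | prev, c :: xs => if c = ' ' ∧ prev = some ' ' then pvGoA (some c) xs else c :: pvGoA (some c) xs

theorem pvFoldA (l : List Char) : ∀ (acc : List Char) (p : Option Char),
    (l.foldl (fun (st : List Char × Option Char) i =>
      if i = ' ' ∧ st.2 = some ' ' then (st.1, some i)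
      else (st.1 ++ [i], some i)) (acc, p)).1 = acc ++ pvGoA p l := by
  induction l with
  | nil => simp [pvGoA]
  | cons c xs ih =>
    intro acc p
    simp only [List.foldl_cons, pvGoA]
    by_cases h : c = ' ' ∧ p = some ' '
    · simp [h, ih]
    · simp [h, ih]

theorem pvGoA_prev_irrel (l : List Char) (p q : Option Char)
    (hp : p ≠ some ' ') (hq : q ≠ some ' ') : pvGoA p l = pvGoA q l := by
  cases l with
  | nil => rfl
  | cons c xs =>
    simp only [pvGoA]
    by_cases hc : c = ' '
    · simp [hc, hp, hq]
    · simp [hc]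

theorem pvGoA_space_run (r : List Char) (rest : List Char) (h : ∀ x ∈ r, x = ' ') :
    pvGoA (some ' ') (r ++ rest) = pvGoA (some ' ') rest := by
  induction r with
  | nil => rfl
  | cons x r ih =>
    have hx : x = ' ' := h x (List.mem_cons_self)
    rw [List.cons_append, show pvGoA (some ' ') (x :: (r ++ rest)) = pvGoA (some ' ') (r ++ rest)
      by simp [pvGoA, hx]]
    exact ih (fun y hy => h y (List.mem_cons_of_mem _ hy))

theorem pvGoA_nonspace_run (c : Char) (hc : c ≠ ' ') (r : List Char) (rest : List Char)
    (h : ∀ x ∈ r, x = c) : ∀ p : Option Char, p ≠ some ' ' →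
    pvGoA p (r ++ rest) = r ++ pvGoA none rest := by
  induction r with
  | nil =>
    intro p hp
    simpa using pvGoA_prev_irrel rest p none hp (by simp)
  | cons x r ih =>
    intro p hp
    have hx : x = c := h x (List.mem_cons_self)
    have hcond : ¬ (x = ' ' ∧ p = some ' ') := fun hh => hc (hx.symm.trans hh.1)
    simp only [List.cons_append, pvGoA, if_neg hcond]
    rw [ih (fun y hy => h y (List.mem_cons_of_mem _ hy)) (some x)
      (by simp [hx]; exact hc)]

theorem pvTakeRun_spec (c : Char) : ∀ xs : List Char,
    (∀ x ∈ (pvTakeRun c xs).1, x = c) ∧ xs = (pvTakeRun c xs).1 ++ (pvTakeRun c xs).2 ∧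
    (∀ d ds, (pvTakeRun c xs).2 = d :: ds → d ≠ c) := by
  intro xs
  induction xs with
  | nil => simp [pvTakeRun]
  | cons x xs ih =>
    simp only [pvTakeRun]
    by_cases h : x = c
    · simp only [if_pos h]
      refine ⟨?_, ?_, ih.2.2⟩
      · intro y hy
        rcases List.mem_cons.mp hy with h1 | h1
        · exact h1.trans h
        · exact ih.1 y h1
      · simpa using ih.2.1
    · simp only [if_neg h]
      exact ⟨by simp, by simp, fun d ds hd => by
        injection hd with h1 _; exact h1 ▸ h⟩

theorem pvMain : ∀ l : List Char, pvGoA none l = pvShortenRuns l := by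
  intro l
  induction hn : l.length using Nat.strong_induction_on generalizing l with
  | _ n ih =>
    cases l with
    | nil => simp [pvShortenRuns, pvGoA]
    | cons c xs =>
      obtain ⟨hall, hsplit, hrest⟩ := pvTakeRun_spec c xs
      have hle := pvTakeRun_rest_le c xs
      simp only [pvShortenRuns]
      rcases hpr : pvTakeRun c xs with ⟨r, rest⟩
      rw [hpr] at hall hsplit hrest hle
      simp only at hall hsplit hrest hle
      have hlen : rest.length < n := by
        subst hn; exact Nat.lt_succ_of_le hle
      have ihrest : pvGoA none rest = pvShortenRuns rest := ih rest.length hlen rest rfl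
      by_cases hc : c = ' '
      · have h2 : pvGoA (some ' ') rest = pvGoA none rest := by
          cases hres : rest with
          | nil => rfl
          | cons d ds =>
            have hd : d ≠ ' ' := fun h => (hrest d ds hres) (h.trans hc.symm)
            simp [pvGoA, hd]
        have hL : pvGoA none (c :: xs) = ' ' :: pvGoA none rest := by
          rw [show pvGoA none (c :: xs) = ' ' :: pvGoA (some ' ') xs by simp [pvGoA, hc],
            hsplit, pvGoA_space_run r rest (fun x hx => (hall x hx).trans hc), h2]
        rw [hL, if_pos hc, ihrest]; rfl
      · have hL : pvGoA none (c :: xs) = c :: (r ++ pvGoA none rest) := by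
          rw [show pvGoA none (c :: xs) = c :: pvGoA (some c) xs by simp [pvGoA, hc],
            hsplit, pvGoA_nonspace_run c hc r rest hall (some c) (by simp [hc])]
        rw [hL, if_neg hc, ihrest]; simp

-- ===== VERDICT (by name: the statement is the Claim_ definition above) =====
theorem shorten_space_spec : Claim_equal_shorten_space := by
  intro text _
  unfold Spec_shorten_space shorten_space shorten_space_alt
  simp only [pvFoldA, List.nil_append, pvMain]
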